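-- pv_equiv track=rewrite | github.com/mustafahh/App-Academy-Practice | app.py | pyramid_sum
-- ===== SOURCE A (Python) =====
-- def uplevel(arr):
-- 	r = []
-- 	for i in range(len(arr)-1):
-- 		r.append(arr[i] + arr[i+1])
-- 	return r
--
-- def pyramid_sum(base):
-- 	result = [base]
-- 	i = 1
-- 	while i < len(base):
-- 		temp = uplevel(result[0])
-- 		result.insert(0, temp)
-- 		i += 1
-- 	return result
-- ===== SOURCE B (Python) =====
-- def pyramid_sum(base):
--     # Each level is computed directly from the base via a Pascal (binomial) row,
--     # instead of iterated adjacent-sum passes.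
--     n = len(base)
--     row = [1]          # binomial coefficients C(t, 0..t), starts at t = 0
--     levels = []
--     for t in range(1, n):
--         row = [1] + [a + b for a, b in zip(row, row[1:])] + [1]
--         levels.append([sum(c * x for c, x in zip(row, base[p:p + t + 1]))
--                        for p in range(n - t)])
--     return list(reversed(levels)) + [base]
-- ===== Notes on version B (the rewrite author's own statement) =====
-- stated objective: alternative
-- what changed: Each pyramid level is computed directly from the base via a row of Pascal binomial coefficients (entry p of level t is sum of C(t,k)*base[p+k]), instead of A's iterated adjacent-sum passes that prepend each new level.
import Mathlib
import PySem

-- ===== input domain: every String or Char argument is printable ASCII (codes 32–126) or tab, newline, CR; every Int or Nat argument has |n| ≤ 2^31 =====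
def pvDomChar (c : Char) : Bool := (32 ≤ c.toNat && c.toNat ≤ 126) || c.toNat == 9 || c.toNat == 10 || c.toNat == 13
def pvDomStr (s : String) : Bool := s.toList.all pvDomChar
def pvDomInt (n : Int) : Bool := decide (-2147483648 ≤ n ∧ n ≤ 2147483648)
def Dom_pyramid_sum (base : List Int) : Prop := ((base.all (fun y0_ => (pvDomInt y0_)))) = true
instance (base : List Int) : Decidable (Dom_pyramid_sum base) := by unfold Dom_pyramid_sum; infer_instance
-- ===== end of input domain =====

-- B replaces A's iterated adjacent-sum passes by computing every level directly from the
-- base with a Pascal (binomial-coefficient) row: a different algorithm, not faster (objective: alternative).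

-- ===== PORT A =====
-- arr[i] / arr[i+1] are always in range for i in range(len(arr)-1), so pyGetD is exact here.
def uplevel (arr : List Int) : List Int :=
  (PySem.List.pyRange 0 ((arr.length : Int) - 1) 1).foldl
    (fun r i => r ++ [PySem.List.pyGetD arr i 0 + PySem.List.pyGetD arr (i+1) 0]) []

-- A's while loop: i only counts from 1 up to len(base), so it is the fold over range(1, len(base));
-- result[0] on the always-nonempty result is headD []; result.insert(0, temp) is temp :: result.
def pyramid_sum (base : List Int) : List (List Int) :=
  (PySem.List.pyRange 1 (base.length : Int) 1).foldl
    (fun result _ => uplevel (result.headD []) :: result) [base]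

-- ===== PORT B =====
-- Transliteration of Source B: state (row, levels); row[1:] and base[p:p+t+1] are slices;
-- sum(c*x for c,x in zip(..)) is (zipWith (· * ·) ..).sum; list(reversed(levels)) + [base].
def pyramid_sum_alt (base : List Int) : List (List Int) :=
  let n : Int := base.length
  let st := (PySem.List.pyRange 1 n 1).foldl
    (fun (st : List Int × List (List Int)) t =>
      let row := 1 :: (List.zipWith (fun a b => a + b) st.1 (PySem.List.slice st.1 (some 1) none)) ++ [1]
      let level := (PySem.List.pyRange 0 (n - t) 1).map (fun p =>
        (List.zipWith (fun c x => c * x) row (PySem.List.slice base (some p) (some (p + t + 1)))).sum)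
      (row, st.2 ++ [level]))
    ([1], [])
  st.2.reverse ++ [base]

-- ===== PRECONDITION & SPEC =====
def Spec_pyramid_sum (base : List Int) (out : List (List Int)) : Prop := out = pyramid_sum_alt base
instance (base : List Int) (out : List (List Int)) : Decidable (Spec_pyramid_sum base out) := by unfold Spec_pyramid_sum; infer_instance

-- ===== CLAIM (what is proved, stated in full; the proofs are below) =====
def Claim_equal_pyramid_sum : Prop := ∀ (base : List Int), Dom_pyramid_sum base → Spec_pyramid_sum base (pyramid_sum base)

-- ===== LEMMAS AND PROOFS =====

-- level t of the pyramid, in closed form from the base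
def lvl (base : List Int) (t : Nat) : List Int :=
  (List.range (base.length - t)).map
    (fun p => ∑ k ∈ Finset.range (t + 1), ((t.choose k : Nat) : Int) * base.getD (p + k) 0)

-- the row of binomial coefficients C(t, 0..t)
def pascalRow (t : Nat) : List Int := (List.range (t + 1)).map (fun k => ((t.choose k : Nat) : Int))

-- one iteration of A's while loop
def stepA (r : List (List Int)) : List (List Int) := uplevel (r.headD []) :: r

lemma foldl_ignore_arg {α β : Type} (g : β → β) (l : List α) (init : β) :
    l.foldl (fun r _ => g r) init = g^[l.length] init := by
  induction l generalizing init with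
  | nil => rfl
  | cons x xs ih => simp [List.foldl_cons, ih, Function.iterate_succ_apply]

lemma uplevel_eq (arr : List Int) :
    uplevel arr = (List.range (arr.length - 1)).map (fun i => arr.getD i 0 + arr.getD (i + 1) 0) := by
  unfold uplevel
  rw [PySem.List.foldl_append_singleton_eq_map, PySem.List.pyRange_one]
  simp only [List.map_map, List.nil_append, Int.sub_zero]
  rw [show ((arr.length : Int) - 1).toNat = arr.length - 1 from by omega]
  apply List.map_congr_left
  intro k hk
  simp only [Function.comp, zero_add]
  rw [PySem.List.pyGetD_natCast]
  congr 1
  exact_mod_cast PySem.List.pyGetD_natCast arr (k + 1) 0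

lemma lvl_zero (base : List Int) : lvl base 0 = base := by
  unfold lvl
  simp
  apply List.ext_getElem
  · simp
  · intro i h1 h2
    simp [List.getElem?_eq_getElem h2]

lemma pascal_sum (t : Nat) (f : Nat → Int) :
    ∑ k ∈ Finset.range (t + 2), (((t + 1).choose k : Nat) : Int) * f k
      = (∑ k ∈ Finset.range (t + 1), ((t.choose k : Nat) : Int) * f k)
        + ∑ k ∈ Finset.range (t + 1), ((t.choose k : Nat) : Int) * f (k + 1) := by
  rw [Finset.sum_range_succ' (fun k => (((t + 1).choose k : Nat) : Int) * f k)]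
  simp only [Nat.choose_succ_succ]
  push_cast
  simp only [add_mul]
  rw [Finset.sum_add_distrib]
  have h1 : ∑ k ∈ Finset.range (t + 1), ((t.choose (k+1) : Nat) : Int) * f (k + 1)
      = ∑ k ∈ Finset.range (t + 1), ((t.choose k : Nat) : Int) * f k - f 0 := by
    have h2 := Finset.sum_range_succ' (fun k => ((t.choose k : Nat) : Int) * f k) (t + 1)
    rw [Finset.sum_range_succ] at h2
    simp [Nat.choose_succ_self] at h2
    linarith
  rw [h1]
  simp
  ring

lemma uplevel_lvl (base : List Int) (t : Nat) (h : t + 1 ≤ base.length) :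
    uplevel (lvl base t) = lvl base (t + 1) := by
  rw [uplevel_eq]
  have hlen : (lvl base t).length = base.length - t := by simp [lvl]
  rw [hlen]
  unfold lvl
  rw [show base.length - t - 1 = base.length - (t + 1) from by omega]
  apply List.map_congr_left
  intro i hi
  simp only [List.mem_range] at hi
  rw [PySem.List.getD_map_range _ _ _ _ (by omega), PySem.List.getD_map_range _ _ _ _ (by omega)]
  rw [pascal_sum t (fun k => base.getD (i + k) 0)]
  congr 1
  apply Finset.sum_congr rfl
  intro k _
  congr 2
  omega

lemma stepA_iter (base : List Int) (m t : Nat) (rest : List (List Int)) (h : t + m ≤ base.length) :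
    stepA^[m] (lvl base t :: rest)
      = (List.range m).map (fun j => lvl base (t + m - j)) ++ (lvl base t :: rest) := by
  induction m generalizing t rest with
  | zero => simp
  | succ m ih =>
    rw [Function.iterate_succ_apply]
    have hstep : stepA (lvl base t :: rest) = lvl base (t + 1) :: lvl base t :: rest := by
      simp [stepA, uplevel_lvl base t (by omega)]
    rw [hstep, ih (t + 1) _ (by omega)]
    rw [List.range_succ, List.map_append]
    simp only [List.map_cons, List.map_nil, List.append_assoc, List.cons_append, List.nil_append]
    have harg : (fun j => lvl base (t + 1 + m - j)) = (fun j => lvl base (t + (m + 1) - j)) := by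
      funext j; congr 1; omega
    rw [harg]
    rw [show t + (m + 1) - m = t + 1 from by omega]

lemma pascalRow_step (t : Nat) :
    1 :: (List.zipWith (fun a b => a + b) (pascalRow t) ((pascalRow t).tail)) ++ [1]
      = pascalRow (t + 1) := by
  apply List.ext_getElem
  · simp [pascalRow]
  · intro i h1 h2
    simp only [pascalRow, List.length_map, List.length_range] at h2
    match i with
    | 0 => simp [pascalRow]
    | i + 1 =>
      have hg : (1 :: (List.zipWith (fun a b : Int => a + b) (pascalRow t) ((pascalRow t).tail)) ++ [1])[i+1] =
          ((List.zipWith (fun a b : Int => a + b) (pascalRow t) ((pascalRow t).tail)) ++ [1])[i]'(by simp [pascalRow]; omega) := by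
        simp
      rw [hg]
      by_cases hit : i < t
      · rw [List.getElem_append_left (by simp [pascalRow]; omega)]
        rw [List.getElem_zipWith]
        simp only [pascalRow, List.getElem_map, List.getElem_range, List.getElem_tail]
        rw [show ((t+1).choose (i+1) : Int) = ((t.choose i + t.choose (i+1) : Nat) : Int) from by rw [Nat.choose_succ_succ]]
        push_cast
        rfl
      · have hit' : i = t := by omega
        subst hit'
        rw [List.getElem_append_right (by simp [pascalRow])]
        simp [pascalRow]

lemma zip_sum (m : Nat) (f : Nat → Int) (ys : List Int) (h : ys.length = m) :
    (List.zipWith (fun c x => c * x) ((List.range m).map f) ys).sum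
      = ∑ k ∈ Finset.range m, f k * ys.getD k 0 := by
  induction m generalizing f ys with
  | zero => simp
  | succ m ih =>
    match ys with
    | y :: ys =>
      simp only [List.length_cons] at h
      rw [List.range_succ_eq_map, List.map_cons, List.zipWith_cons_cons, List.sum_cons]
      rw [List.map_map]
      have hih := ih (fun k => f (k + 1)) ys (by omega)
      simp only [Function.comp_def] at hih ⊢
      rw [hih]
      rw [Finset.sum_range_succ' (fun k => f k * (y :: ys).getD k 0)]
      simp only [List.getD_cons_succ, List.getD_cons_zero]
      ring

lemma level_eq_lvl (base : List Int) (t : Nat) (h2 : t ≤ base.length) :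
    ((PySem.List.pyRange 0 ((base.length : Int) - (t : Int)) 1).map (fun p =>
        (List.zipWith (fun c x => c * x) (pascalRow t)
          (PySem.List.slice base (some p) (some (p + (t : Int) + 1)))).sum))
      = lvl base t := by
  rw [PySem.List.pyRange_one, List.map_map]
  unfold lvl
  rw [show ((base.length : Int) - (t : Int) - 0).toNat = base.length - t from by omega]
  apply List.map_congr_left
  intro p hp
  simp only [List.mem_range] at hp
  simp only [Function.comp, zero_add]
  have hslice : PySem.List.slice base (some (p : Int)) (some ((p : Int) + (t : Int) + 1))
      = (base.drop p).take (t + 1) := by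
    rw [show ((p : Int) + (t : Int) + 1) = ((p : Int) + ((t + 1 : Nat) : Int)) from by push_cast; ring]
    exact PySem.List.slice_natCast_add base p (t + 1)
  rw [hslice]
  have hlen : ((base.drop p).take (t + 1)).length = t + 1 := by
    simp [List.length_take, List.length_drop]; omega
  rw [show pascalRow t = (List.range (t + 1)).map (fun k => ((t.choose k : Nat) : Int)) from rfl]
  rw [zip_sum (t + 1) _ _ hlen]
  apply Finset.sum_congr rfl
  intro k hk
  simp only [Finset.mem_range] at hk
  congr 1
  rw [List.getD_eq_getElem _ _ (by omega), List.getD_eq_getElem _ _ (by omega)]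
  rw [List.getElem_take, List.getElem_drop]

lemma reverse_map_range {α : Type} (m : Nat) (f : Nat → α) :
    ((List.range m).map f).reverse = (List.range m).map (fun j => f (m - 1 - j)) := by
  apply List.ext_getElem
  · simp
  · intro i h1 h2
    simp [List.getElem_reverse]

lemma foldB_invariant (base : List Int) (s : Nat) (hs : s ≤ base.length) :
    (PySem.List.pyRange 1 ((s : Int) + 1) 1).foldl
      (fun (st : List Int × List (List Int)) t =>
        let row := 1 :: (List.zipWith (fun a b => a + b) st.1 (PySem.List.slice st.1 (some 1) none)) ++ [1]
        let level := (PySem.List.pyRange 0 ((base.length : Int) - t) 1).map (fun p =>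
          (List.zipWith (fun c x => c * x) row (PySem.List.slice base (some p) (some (p + t + 1)))).sum)
        (row, st.2 ++ [level]))
      ([1], [])
    = (pascalRow s, (List.range s).map (fun j => lvl base (j + 1))) := by
  induction s with
  | zero =>
    rw [PySem.List.pyRange_one_eq_nil (by omega)]
    simp [pascalRow]
  | succ s ih =>
    rw [show ((s + 1 : Nat) : Int) + 1 = ((s : Int) + 1) + 1 from by push_cast; ring]
    rw [PySem.List.pyRange_one_succ_right (by omega)]
    rw [List.foldl_append]
    rw [ih (by omega)]
    simp only [List.foldl_cons, List.foldl_nil]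
    have hrow : (1 :: (List.zipWith (fun a b => a + b) (pascalRow s)
        (PySem.List.slice (pascalRow s) (some 1) none)) ++ [1] : List Int) = pascalRow (s + 1) := by
      rw [PySem.List.slice_from_one]
      exact pascalRow_step s
    rw [hrow]
    have ht : ((s : Int) + 1) = (((s + 1 : Nat) : Int)) := by push_cast; ring
    have hlevel : ((PySem.List.pyRange 0 ((base.length : Int) - ((s : Int) + 1)) 1).map (fun p =>
        (List.zipWith (fun c x => c * x) (pascalRow (s + 1))
          (PySem.List.slice base (some p) (some (p + ((s : Int) + 1) + 1)))).sum))
        = lvl base (s + 1) := by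
      rw [ht]
      exact level_eq_lvl base (s + 1) (by omega)
    rw [hlevel]
    rw [List.range_succ, List.map_append]
    simp

-- ===== VERDICT (by name: the statement is the Claim_ definition above) =====
theorem pyramid_sum_spec : Claim_equal_pyramid_sum := by
  unfold Claim_equal_pyramid_sum Spec_pyramid_sum
  intro base _
  unfold pyramid_sum pyramid_sum_alt
  match hn : base.length with
  | 0 =>
    have : base = [] := List.eq_nil_of_length_eq_zero hn
    subst this
    decide
  | m + 1 =>
    -- A's side
    rw [show (fun (result : List (List Int)) (_ : Int) => uplevel (result.headD []) :: result)
        = (fun r _ => stepA r) from rfl]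
    rw [foldl_ignore_arg]
    rw [PySem.List.length_pyRange_one]
    rw [show (((m + 1 : Nat) : Int) - 1).toNat = m from by omega]
    rw [show ([base] : List (List Int)) = lvl base 0 :: [] from by rw [lvl_zero]]
    rw [stepA_iter base m 0 [] (by omega)]
    -- B's side
    rw [show ((m + 1 : Nat) : Int) = ((m : Int) + 1) from by push_cast; ring]
    have hB := foldB_invariant base m (by omega)
    rw [hn] at hB
    push_cast at hB ⊢
    simp only [hB]
    rw [reverse_map_range]
    rw [lvl_zero]
    congr 1
    apply List.map_congr_left
    intro j hj
    simp only [List.mem_range] at hj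
    congr 1
    omega
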